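-- pv_equiv track=rewrite | github.com/TimoH447/kstates | src/jonespolynom.py | get_summands_binomial_theorem
-- ===== SOURCE A (Python) =====
-- import math
--
-- def get_summands_binomial_theorem(power):
--     summands = []
--     if power == 0:
--         return [[1,0]]
--     elif power == 1:
--         return [[-1,2],[-1,-2]]
--     for i in range(power+1):
--         coefficient = math.comb(power,i)
--         power_in_summand = 2*(i-power+i)
--         if power%2 ==1:
--             coefficient = -coefficient
--         summands.append([coefficient,power_in_summand])
--     return summands
-- ===== SOURCE B (Python) =====
-- def get_summands_binomial_theorem(power):
--     if power == 0:
--         return [[1, 0]]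
--     if power == 1:
--         return [[-1, 2], [-1, -2]]
--     sign = -1 if power % 2 == 1 else 1
--     summands = []
--     c = 1
--     for i in range(power + 1):
--         summands.append([sign * c, 4 * i - 2 * power])
--         c = c * (power - i) // (i + 1)
--     return summands
-- ===== Notes on version B (the rewrite author's own statement) =====
-- stated objective: faster
-- what changed: B replaces the per-term math.comb call (which recomputes each binomial from scratch) by a single running coefficient updated with the Pascal ratio c = c*(power-i)//(i+1), and hoists the parity sign out of the loop.
import Mathlib
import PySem

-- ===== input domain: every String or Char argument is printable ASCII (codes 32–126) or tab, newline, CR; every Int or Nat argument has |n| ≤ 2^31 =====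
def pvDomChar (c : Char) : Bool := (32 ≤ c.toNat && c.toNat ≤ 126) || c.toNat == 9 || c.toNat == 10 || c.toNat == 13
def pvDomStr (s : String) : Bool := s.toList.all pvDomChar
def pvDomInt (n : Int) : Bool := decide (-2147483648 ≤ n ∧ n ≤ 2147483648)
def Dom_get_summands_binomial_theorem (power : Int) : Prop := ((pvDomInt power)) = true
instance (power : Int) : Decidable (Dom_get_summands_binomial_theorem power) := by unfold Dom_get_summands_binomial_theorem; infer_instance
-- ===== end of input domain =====

-- B computes each binomial coefficient incrementally from the previous one (Pascal ratio)
-- instead of calling math.comb per term: O(n) instead of O(n^2) multiplications.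

-- ===== PORT A =====
def get_summands_binomial_theorem (power : Int) : List (List Int) :=
  if power == 0 then [[1, 0]]
  else if power == 1 then [[-1, 2], [-1, -2]]
  else
    (PySem.List.pyRange 0 (power + 1) 1).foldl
      (fun summands i =>
        let coefficient : Int := ((power.toNat.choose i.toNat : Nat) : Int)
        let power_in_summand : Int := 2 * (i - power + i)
        let coefficient := if PySem.Int.mod power 2 == 1 then -coefficient else coefficient
        summands ++ [[coefficient, power_in_summand]])
      []

-- ===== PORT B =====
def get_summands_binomial_theorem_alt (power : Int) : List (List Int) :=
  if power == 0 then [[1, 0]]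
  else if power == 1 then [[-1, 2], [-1, -2]]
  else
    let sign : Int := if PySem.Int.mod power 2 == 1 then -1 else 1
    ((PySem.List.pyRange 0 (power + 1) 1).foldl
      (fun (st : Int × List (List Int)) i =>
        (PySem.Int.floordiv (st.1 * (power - i)) (i + 1),
         st.2 ++ [[sign * st.1, 4 * i - 2 * power]]))
      (1, [])).2

-- ===== PRECONDITION & SPEC =====
def Spec_get_summands_binomial_theorem (power : Int) (out : List (List Int)) : Prop := out = get_summands_binomial_theorem_alt power
instance (power : Int) (out : List (List Int)) : Decidable (Spec_get_summands_binomial_theorem power out) := by unfold Spec_get_summands_binomial_theorem; infer_instance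

-- ===== CLAIM (what is proved, stated in full; the proofs are below) =====
def Claim_equal_get_summands_binomial_theorem : Prop := ∀ (power : Int), Dom_get_summands_binomial_theorem power → Spec_get_summands_binomial_theorem power (get_summands_binomial_theorem power)

-- ===== LEMMAS AND PROOFS =====

-- The running coefficient of B's loop after k iterations is C(power, k);
-- hence B's fold over range n yields exactly the list of signed binomials.
theorem pv_b_loop (p : Int) (sgn : Int) (n : Nat) (hn : (n : Int) ≤ p + 1) :
    (List.range n).foldl
      (fun (st : Int × List (List Int)) (k : Nat) =>
        (PySem.Int.floordiv (st.1 * (p - (k : Int))) ((k : Int) + 1),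
         st.2 ++ [[sgn * st.1, 4 * (k : Int) - 2 * p]]))
      (1, ([] : List (List Int)))
    = (((p.toNat.choose n : Nat) : Int),
       (List.range n).map (fun k =>
         [sgn * ((p.toNat.choose k : Nat) : Int), 4 * (k : Int) - 2 * p])) := by
  induction n with
  | zero => simp
  | succ n ih =>
    have hn' : (n : Int) ≤ p + 1 := by push_cast at hn ⊢; omega
    have hnp : (n : Int) ≤ p := by push_cast at hn; omega
    have hp0 : 0 ≤ p := le_trans (by positivity) hnp
    have hm : p = ((p.toNat : Nat) : Int) := (Int.toNat_of_nonneg hp0).symm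
    have hnm : n ≤ p.toNat := by omega
    rw [List.range_succ, List.foldl_append, ih hn', List.map_append]
    simp only [List.foldl_cons, List.foldl_nil, List.map_cons, List.map_nil]
    refine Prod.ext ?_ rfl
    show PySem.Int.floordiv (((p.toNat.choose n : Nat) : Int) * (p - (n : Int))) ((n : Int) + 1)
        = ((p.toNat.choose (n + 1) : Nat) : Int)
    have hsub : p - (n : Int) = ((p.toNat - n : Nat) : Int) := by omega
    rw [hsub]
    have : (((p.toNat.choose n : Nat) : Int)) * ((p.toNat - n : Nat) : Int)
        = (((p.toNat.choose n * (p.toNat - n) : Nat) : Nat) : Int) := by push_cast; ring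
    rw [this]
    have h1 : ((n : Int) + 1) = (((n + 1 : Nat) : Nat) : Int) := by push_cast; ring
    rw [h1, PySem.Int.floordiv_natCast]
    congr 1
    rw [← Nat.choose_succ_right_eq]
    exact Nat.mul_div_cancel _ (Nat.succ_pos n)

theorem get_summands_binomial_theorem_eq (power : Int) :
    get_summands_binomial_theorem power = get_summands_binomial_theorem_alt power := by
  unfold get_summands_binomial_theorem get_summands_binomial_theorem_alt
  by_cases h0 : power = 0
  · simp [h0]
  by_cases h1 : power = 1
  · simp [h1]
  simp only [beq_iff_eq, h0, h1, if_false]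
  rw [PySem.List.pyRange_one, List.foldl_map, List.foldl_map,
      PySem.List.foldl_append_singleton_eq_map]
  by_cases hp : 0 ≤ power
  · have hn : (((power + 1).toNat : Nat) : Int) ≤ power + 1 := by
      rw [Int.toNat_of_nonneg (by omega)]
    have hcongr :
        (List.range (power + 1 - 0).toNat).foldl
          (fun (st : Int × List (List Int)) (k : Nat) =>
            (PySem.Int.floordiv (st.1 * (power - (0 + (k : Int)))) (0 + (k : Int) + 1),
             st.2 ++ [[(if PySem.Int.mod power 2 = 1 then -1 else 1 : Int) * st.1,
                       4 * (0 + (k : Int)) - 2 * power]]))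
          (1, ([] : List (List Int)))
        = (List.range (power + 1 - 0).toNat).foldl
          (fun (st : Int × List (List Int)) (k : Nat) =>
            (PySem.Int.floordiv (st.1 * (power - (k : Int))) ((k : Int) + 1),
             st.2 ++ [[(if PySem.Int.mod power 2 = 1 then -1 else 1 : Int) * st.1,
                       4 * (k : Int) - 2 * power]]))
          (1, ([] : List (List Int))) := by
      apply PySem.List.foldl_congr_mem
      intro acc k _
      simp
    rw [hcongr, pv_b_loop power _ _ (by simpa using hn)]
    apply List.map_congr_left
    intro k _
    simp only [zero_add, Int.toNat_natCast]
    have harith : 2 * ((k : Int) - power + k) = 4 * k - 2 * power := by ring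
    by_cases hodd : PySem.Int.mod power 2 = 1
    · rw [if_pos hodd, if_pos hodd, harith, neg_one_mul]
    · rw [if_neg hodd, if_neg hodd, harith, one_mul]
  · have hz : (power + 1 - 0).toNat = 0 := by omega
    rw [hz]
    simp

-- ===== VERDICT (by name: the statement is the Claim_ definition above) =====
theorem get_summands_binomial_theorem_spec : Claim_equal_get_summands_binomial_theorem := by
  intro power _
  unfold Spec_get_summands_binomial_theorem
  exact get_summands_binomial_theorem_eq power
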